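-- pv_equiv track=rewrite | github.com/emrek0ca/elyan | tools/research_tools/report_visualizations.py | _generate_text_findings_distribution
-- ===== SOURCE A (Python) =====
-- from typing import Dict, List, Any, Optional
--
-- def _generate_text_findings_distribution(findings: List[str]) -> str:
--     """Fallback: Generate text-based findings distribution"""
--     short = len([f for f in findings if len(f) < 50])
--     medium = len([f for f in findings if 50 <= len(f) < 150])
--     long = len([f for f in findings if len(f) >= 150])
--
--     html = '<div style="margin:20px 0;">'
--     html += f'<p><strong>Brief Findings:</strong> {short}</p>'
--     html += f'<p><strong>Detailed Findings:</strong> {medium}</p>'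
--     html += f'<p><strong>Comprehensive Findings:</strong> {long}</p>'
--     html += '</div>'
--     return html
-- ===== SOURCE B (Python) =====
-- def _generate_text_findings_distribution(findings):
--     """Fallback: Generate text-based findings distribution"""
--     short = medium = long = 0
--     for f in findings:
--         n = len(f)
--         if n < 50:
--             short += 1
--         elif n < 150:
--             medium += 1
--         else:
--             long += 1
--     return (
--         '<div style="margin:20px 0;">'
--         f'<p><strong>Brief Findings:</strong> {short}</p>'
--         f'<p><strong>Detailed Findings:</strong> {medium}</p>'
--         f'<p><strong>Comprehensive Findings:</strong> {long}</p>'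
--         '</div>'
--     )
-- ===== Notes on version B (the rewrite author's own statement) =====
-- stated objective: simpler
-- what changed: Replaces three independent full filtering scans (one comprehension per bucket) with a single pass that classifies each finding once via if/elif/else into three counters.
import Mathlib
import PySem

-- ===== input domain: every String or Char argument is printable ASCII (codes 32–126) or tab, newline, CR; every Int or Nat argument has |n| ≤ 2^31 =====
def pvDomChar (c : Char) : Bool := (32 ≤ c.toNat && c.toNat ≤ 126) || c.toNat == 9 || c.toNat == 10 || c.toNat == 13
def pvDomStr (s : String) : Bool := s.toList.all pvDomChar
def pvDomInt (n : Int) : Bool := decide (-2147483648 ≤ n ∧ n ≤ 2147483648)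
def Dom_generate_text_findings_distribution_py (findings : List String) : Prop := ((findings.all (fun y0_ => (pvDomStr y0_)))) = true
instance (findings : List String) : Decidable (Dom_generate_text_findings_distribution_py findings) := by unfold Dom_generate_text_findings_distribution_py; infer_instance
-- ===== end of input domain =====

-- B replaces A's three independent filtering passes with one fold that classifies each finding once into three counters (objective: simpler).


-- ===== PORT A =====
-- three full filtering passes, one per bucket, then the HTML built by successive appends
def generate_text_findings_distribution_py (findings : List String) : String :=
  let short : Int := (findings.filter (fun f => PySem.Str.len f < 50)).length
  let medium : Int := (findings.filter (fun f => 50 ≤ PySem.Str.len f ∧ PySem.Str.len f < 150)).length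
  let long : Int := (findings.filter (fun f => 150 ≤ PySem.Str.len f)).length
  let html := "<div style=\"margin:20px 0;\">"
  let html := html ++ ("<p><strong>Brief Findings:</strong> " ++ PySem.Int.toStr short ++ "</p>")
  let html := html ++ ("<p><strong>Detailed Findings:</strong> " ++ PySem.Int.toStr medium ++ "</p>")
  let html := html ++ ("<p><strong>Comprehensive Findings:</strong> " ++ PySem.Int.toStr long ++ "</p>")
  let html := html ++ "</div>"
  html

-- ===== PORT B =====
-- single pass: one if/elif/else per finding, incrementing exactly one of three counters
def bStep (acc : Int × Int × Int) (f : String) : Int × Int × Int :=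
  let n := PySem.Str.len f
  if n < 50 then (acc.1 + 1, acc.2.1, acc.2.2)
  else if n < 150 then (acc.1, acc.2.1 + 1, acc.2.2)
  else (acc.1, acc.2.1, acc.2.2 + 1)

def generate_text_findings_distribution_py_alt (findings : List String) : String :=
  let c := findings.foldl bStep (0, 0, 0)
  "<div style=\"margin:20px 0;\">"
    ++ "<p><strong>Brief Findings:</strong> " ++ PySem.Int.toStr c.1 ++ "</p>"
    ++ "<p><strong>Detailed Findings:</strong> " ++ PySem.Int.toStr c.2.1 ++ "</p>"
    ++ "<p><strong>Comprehensive Findings:</strong> " ++ PySem.Int.toStr c.2.2 ++ "</p>"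
    ++ "</div>"

-- ===== PRECONDITION & SPEC =====
def Spec_generate_text_findings_distribution_py (findings : List String) (out : String) : Prop := out = generate_text_findings_distribution_py_alt findings
instance (findings : List String) (out : String) : Decidable (Spec_generate_text_findings_distribution_py findings out) := by unfold Spec_generate_text_findings_distribution_py; infer_instance

-- ===== CLAIM (what is proved, stated in full; the proofs are below) =====
def Claim_equal_generate_text_findings_distribution_py : Prop := ∀ (findings : List String), Dom_generate_text_findings_distribution_py findings → Spec_generate_text_findings_distribution_py findings (generate_text_findings_distribution_py findings)

-- ===== LEMMAS AND PROOFS =====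

-- the fold's accumulator carries the three filter-counts
theorem bStep_foldl (xs : List String) (s m l : Int) :
    xs.foldl bStep (s, m, l) =
      (s + (xs.filter (fun f => PySem.Str.len f < 50)).length,
       m + (xs.filter (fun f => decide (50 ≤ PySem.Str.len f ∧ PySem.Str.len f < 150))).length,
       l + (xs.filter (fun f => 150 ≤ PySem.Str.len f)).length) := by
  induction xs generalizing s m l with
  | nil => simp
  | cons x xs ih =>
    simp only [List.foldl_cons, bStep]
    split_ifs with h1 h2
    all_goals simp only [PySem.Str.len_eq, String.length_toList] at h1
    all_goals try simp only [PySem.Str.len_eq, String.length_toList] at h2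
    · have hn1 : x.length < 50 := by omega
      have hn2 : ¬ 50 ≤ x.length := by omega
      have hn3 : ¬ 150 ≤ x.length := by omega
      rw [ih]; simp [hn1, hn2, hn3, Prod.ext_iff]; omega
    · have hn1 : ¬ x.length < 50 := by omega
      have hn2 : 50 ≤ x.length := by omega
      have hn2' : x.length < 150 := by omega
      have hn3 : ¬ 150 ≤ x.length := by omega
      rw [ih]; simp [hn1, hn2, hn2', hn3, Prod.ext_iff]; omega
    · have hn1 : ¬ x.length < 50 := by omega
      have hn2 : ¬ x.length < 150 := by omega
      have hn3 : 150 ≤ x.length := by omega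
      rw [ih]; simp [hn1, hn2, hn3, Prod.ext_iff]; omega

-- ===== VERDICT (by name: the statement is the Claim_ definition above) =====
theorem generate_text_findings_distribution_py_spec : Claim_equal_generate_text_findings_distribution_py := by
  intro findings _
  show _ = _
  unfold generate_text_findings_distribution_py generate_text_findings_distribution_py_alt
  rw [bStep_foldl]
  simp [← String.append_assoc]
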